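-- pv_equiv track=rewrite | github.com/atomextranova/leetcode-python | Amazon OA/Intern/Path With Maximum Score/dp.py | max_min_path
-- ===== SOURCE A (Python) =====
-- def max_min_path(matrix):
--     if not matrix or not matrix[0]:
--         return 0
--
--     n, m = len(matrix), len(matrix[0])
--
--     if n * m <= 2:
--         return 0
--
--     dp = [[0] * m for _ in range(n)]
--     dp[0][1] = matrix[0][1]
--     dp[1][0] = matrix[1][0]
--     for i in range(2, m):
--         dp[0][i] = min(matrix[0][i], dp[0][i-1])
--
--     for i in range(2, n):
--         dp[i][0] = min(matrix[i][0], dp[i-1][0])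
--
--     for i in range(1, n):
--         for j in range(1, m):
--             dp[i][j] = min(matrix[i][j], max(dp[i - 1][j], dp[i][j - 1]))
--
--     if n == 1:
--         return dp[0][-2]
--     elif m == 1:
--         return dp[-2][0]
--     else:
--         return max(dp[-2][-1], dp[-1][-2])
-- ===== SOURCE B (Python) =====
-- def max_min_path(matrix):
--     if not matrix or not matrix[0]:
--         return 0
--     n, m = len(matrix), len(matrix[0])
--     if n * m <= 2:
--         return 0
--     memo = {}
--
--     def f(i, j):
--         if (i, j) in memo:
--             return memo[(i, j)]
--         if i == 0 and j == 0:
--             v = 0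
--         elif i == 0 and j == 1:
--             v = matrix[0][1]
--         elif i == 1 and j == 0:
--             v = matrix[1][0]
--         elif i == 0:
--             v = min(matrix[0][j], f(0, j - 1))
--         elif j == 0:
--             v = min(matrix[i][0], f(i - 1, 0))
--         else:
--             v = min(matrix[i][j], max(f(i - 1, j), f(i, j - 1)))
--         memo[(i, j)] = v
--         return v
--
--     if n == 1:
--         return f(0, m - 2)
--     elif m == 1:
--         return f(n - 2, 0)
--     else:
--         return max(f(n - 2, m - 1), f(n - 1, m - 2))
-- ===== Notes on version B (the rewrite author's own statement) =====
-- stated objective: alternative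
-- what changed: Replaced the bottom-up n*m DP table (preallocated list-of-lists filled by three index-writing loops) with a top-down memoized recursion f(i,j) caching results in a dict, so no grid is materialized and only cells reachable from the two final corners are computed.
import Mathlib
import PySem

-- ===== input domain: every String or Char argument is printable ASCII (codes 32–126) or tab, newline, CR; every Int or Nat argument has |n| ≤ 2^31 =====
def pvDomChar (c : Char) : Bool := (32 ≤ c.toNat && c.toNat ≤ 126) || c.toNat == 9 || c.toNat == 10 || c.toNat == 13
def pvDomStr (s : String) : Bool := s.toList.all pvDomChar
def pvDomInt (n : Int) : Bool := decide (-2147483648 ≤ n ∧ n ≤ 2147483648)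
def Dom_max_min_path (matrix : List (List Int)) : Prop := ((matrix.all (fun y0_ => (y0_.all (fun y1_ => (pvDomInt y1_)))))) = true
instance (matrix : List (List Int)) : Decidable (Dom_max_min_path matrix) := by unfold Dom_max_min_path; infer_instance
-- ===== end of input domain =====

-- B replaces A's bottom-up n×m DP table (preallocated and filled by index-writing loops) with a
-- top-down memoized recursion over the same recurrence (objective: alternative decomposition).

-- ===== PORT A =====
-- matrix[i][j] read (on every input admitted by Pre_ these indices are in range, so the
-- default 0 is never used there)
def get2 (xs : List (List Int)) (i j : Int) : Int :=
  (PySem.List.pyGet? ((PySem.List.pyGet? xs i).getD []) j).getD 0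

def set2 (dp : List (List Int)) (i j : Int) (v : Int) : List (List Int) :=
  dp.set i.toNat ((dp.getD i.toNat []).set j.toNat v)

def max_min_path (matrix : List (List Int)) : Int :=
  if matrix.length = 0 ∨ (matrix.headD []).length = 0 then 0
  else
    let n : Int := matrix.length
    let m : Int := (matrix.headD []).length
    if n * m ≤ 2 then 0
    else
      let dp0 : List (List Int) := List.replicate matrix.length (List.replicate (matrix.headD []).length (0 : Int))
      let dp1 := set2 dp0 0 1 (get2 matrix 0 1)
      let dp2 := set2 dp1 1 0 (get2 matrix 1 0)
      let dp3 := (PySem.List.pyRange 2 m 1).foldl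
        (fun dp i => set2 dp 0 i (min (get2 matrix 0 i) (get2 dp 0 (i - 1)))) dp2
      let dp4 := (PySem.List.pyRange 2 n 1).foldl
        (fun dp i => set2 dp i 0 (min (get2 matrix i 0) (get2 dp (i - 1) 0))) dp3
      let dp5 := (PySem.List.pyRange 1 n 1).foldl
        (fun dp i => (PySem.List.pyRange 1 m 1).foldl
          (fun dp j => set2 dp i j (min (get2 matrix i j) (max (get2 dp (i - 1) j) (get2 dp i (j - 1))))) dp) dp4
      if n = 1 then get2 dp5 0 (-2)
      else if m = 1 then get2 dp5 (-2) 0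
      else max (get2 dp5 (-2) (-1)) (get2 dp5 (-1) (-2))

-- ===== PORT B =====
def goB (matrix : List (List Int)) (memo : PySem.Dict (Int × Int) Int) (i j : Nat) :
    PySem.Dict (Int × Int) Int × Int :=
  match memo.get? ((i : Int), (j : Int)) with
  | some v => (memo, v)
  | none =>
    let (memo', v) : PySem.Dict (Int × Int) Int × Int :=
      if i = 0 ∧ j = 0 then (memo, 0)
      else if i = 0 ∧ j = 1 then (memo, get2 matrix 0 1)
      else if i = 1 ∧ j = 0 then (memo, get2 matrix 1 0)
      else if i = 0 then
        let (m1, a) := goB matrix memo 0 (j - 1)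
        (m1, min (get2 matrix 0 (j : Int)) a)
      else if j = 0 then
        let (m1, a) := goB matrix memo (i - 1) 0
        (m1, min (get2 matrix (i : Int) 0) a)
      else
        let (m1, a) := goB matrix memo (i - 1) j
        let (m2, b) := goB matrix m1 i (j - 1)
        (m2, min (get2 matrix (i : Int) (j : Int)) (max a b))
    (memo'.insert ((i : Int), (j : Int)) v, v)
termination_by i + j
decreasing_by all_goals omega

def max_min_path_alt (matrix : List (List Int)) : Int :=
  if matrix.length = 0 ∨ (matrix.headD []).length = 0 then 0
  else
    let n : Nat := matrix.length
    let m : Nat := (matrix.headD []).length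
    if n * m ≤ 2 then 0
    else if n = 1 then (goB matrix PySem.Dict.empty 0 (m - 2)).2
    else if m = 1 then (goB matrix PySem.Dict.empty (n - 2) 0).2
    else
      let (memo1, a) := goB matrix PySem.Dict.empty (n - 2) (m - 1)
      let (_, b) := goB matrix memo1 (n - 1) (m - 2)
      max a b

-- ===== PRECONDITION & SPEC =====
-- Pre_ excludes exactly the inputs on which Python A raises IndexError and returns nothing:
-- single-row grids with ≥ 3 columns and single-column grids with ≥ 3 rows (the seeding lines
-- dp[0][1] = matrix[0][1] / dp[1][0] = matrix[1][0] index a missing row/column), and ragged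
-- grids with a later row shorter than the first row (the DP loop indexes past its end).
def Pre_max_min_path (matrix : List (List Int)) : Prop :=
  matrix.length = 0 ∨ (matrix.headD []).length = 0 ∨
  matrix.length * (matrix.headD []).length ≤ 2 ∨
  (2 ≤ matrix.length ∧ 2 ≤ (matrix.headD []).length ∧
    ∀ row ∈ matrix, (matrix.headD []).length ≤ row.length)
instance (matrix : List (List Int)) : Decidable (Pre_max_min_path matrix) := by
  unfold Pre_max_min_path; infer_instance

def pvWitness_max_min_path : List (List Int) := [[5, 1], [4, 5]]

def Spec_max_min_path (matrix : List (List Int)) (out : Int) : Prop := out = max_min_path_alt matrix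
instance (matrix : List (List Int)) (out : Int) : Decidable (Spec_max_min_path matrix out) := by unfold Spec_max_min_path; infer_instance

-- ===== CLAIM (what is proved, stated in full; the proofs are below) =====
def Claim_equal_max_min_path : Prop := ∀ (matrix : List (List Int)), Dom_max_min_path matrix → Pre_max_min_path matrix → Spec_max_min_path matrix (max_min_path matrix)

-- ===== LEMMAS AND PROOFS =====

-- the shared recurrence: g matrix i j is the value both programs store for cell (i, j)
def g (matrix : List (List Int)) : Nat → Nat → Int
  | 0, 0 => 0
  | 0, 1 => get2 matrix 0 1
  | 1, 0 => get2 matrix 1 0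
  | 0, (j + 2) => min (get2 matrix 0 ((j : Int) + 2)) (g matrix 0 (j + 1))
  | (i + 2), 0 => min (get2 matrix ((i : Int) + 2) 0) (g matrix (i + 1) 0)
  | (i + 1), (j + 1) => min (get2 matrix ((i : Int) + 1) ((j : Int) + 1))
      (max (g matrix i (j + 1)) (g matrix (i + 1) j))
termination_by i j => (i + j, i)

theorem g_row0 (matrix : List (List Int)) (j : Nat) (hj : 2 ≤ j) :
    g matrix 0 j = min (get2 matrix 0 (j : Int)) (g matrix 0 (j - 1)) := by
  obtain ⟨j', rfl⟩ : ∃ j', j = j' + 2 := ⟨j - 2, by omega⟩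
  rw [g]
  push_cast
  norm_num

theorem g_col0 (matrix : List (List Int)) (i : Nat) (hi : 2 ≤ i) :
    g matrix i 0 = min (get2 matrix (i : Int) 0) (g matrix (i - 1) 0) := by
  obtain ⟨i', rfl⟩ : ∃ i', i = i' + 2 := ⟨i - 2, by omega⟩
  rw [g]
  push_cast
  norm_num

theorem g_main (matrix : List (List Int)) (i j : Nat) (hi : 1 ≤ i) (hj : 1 ≤ j) :
    g matrix i j = min (get2 matrix (i : Int) (j : Int))
      (max (g matrix (i - 1) j) (g matrix i (j - 1))) := by
  obtain ⟨i', rfl⟩ : ∃ i', i = i' + 1 := ⟨i - 1, by omega⟩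
  obtain ⟨j', rfl⟩ : ∃ j', j = j' + 1 := ⟨j - 1, by omega⟩
  rw [g]
  push_cast
  norm_num

def GoodMemo (matrix : List (List Int)) (memo : PySem.Dict (Int × Int) Int) : Prop :=
  ∀ (i j : Nat) (v : Int), memo.get? ((i : Int), (j : Int)) = some v → v = g matrix i j

theorem GoodMemo_empty (matrix : List (List Int)) : GoodMemo matrix PySem.Dict.empty := by
  intro i j v h
  simp [PySem.Dict.get?_empty] at h

theorem GoodMemo_insert (matrix : List (List Int)) (memo : PySem.Dict (Int × Int) Int)
    (i j : Nat) (v : Int) (hg : GoodMemo matrix memo) (hv : v = g matrix i j) :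
    GoodMemo matrix (memo.insert ((i : Int), (j : Int)) v) := by
  intro i' j' w h
  rw [PySem.Dict.get?_insert] at h
  split at h
  · rename_i heq
    obtain ⟨hi, hj⟩ := Prod.mk.injEq .. ▸ heq
    have hi' : i' = i := by exact_mod_cast hi
    have hj' : j' = j := by exact_mod_cast hj
    subst hi' hj'
    cases h
    exact hv
  · exact hg i' j' w h

theorem goB_spec (matrix : List (List Int)) :
    ∀ (k i j : Nat), i + j ≤ k → ∀ memo, GoodMemo matrix memo →
      (goB matrix memo i j).2 = g matrix i j ∧ GoodMemo matrix (goB matrix memo i j).1 := by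
  intro k
  induction k with
  | zero =>
    intro i j hij memo hg
    have hi : i = 0 := by omega
    have hj : j = 0 := by omega
    subst hi hj
    rw [goB.eq_def]
    cases h : memo.get? (((0 : Nat) : Int), ((0 : Nat) : Int)) with
    | some v => exact ⟨hg 0 0 v h, hg⟩
    | none =>
      dsimp only
      rw [if_pos ⟨rfl, rfl⟩]
      exact ⟨by dsimp only; rw [g], GoodMemo_insert matrix memo 0 0 0 hg (by rw [g])⟩
  | succ k ih =>
    intro i j hij memo hg
    rw [goB.eq_def]
    cases h : memo.get? (((i : Nat) : Int), ((j : Nat) : Int)) with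
    | some v => exact ⟨hg i j v h, hg⟩
    | none =>
      dsimp only
      by_cases h00 : i = 0 ∧ j = 0
      · rw [if_pos h00]
        obtain ⟨rfl, rfl⟩ := h00
        exact ⟨by dsimp only; rw [g], GoodMemo_insert matrix memo 0 0 0 hg (by rw [g])⟩
      · rw [if_neg h00]
        by_cases h01 : i = 0 ∧ j = 1
        · rw [if_pos h01]
          obtain ⟨rfl, rfl⟩ := h01
          exact ⟨by dsimp only; rw [g], GoodMemo_insert matrix memo 0 1 _ hg (by rw [g])⟩
        · rw [if_neg h01]
          by_cases h10 : i = 1 ∧ j = 0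
          · rw [if_pos h10]
            obtain ⟨rfl, rfl⟩ := h10
            exact ⟨by dsimp only; rw [g], GoodMemo_insert matrix memo 1 0 _ hg (by rw [g])⟩
          · rw [if_neg h10]
            by_cases hi0 : i = 0
            · rw [if_pos hi0]
              subst hi0
              have hj2 : 2 ≤ j := by omega
              obtain ⟨ha, hm⟩ := ih 0 (j - 1) (by omega) memo hg
              rcases hr : goB matrix memo 0 (j - 1) with ⟨m1, a⟩
              rw [hr] at ha hm
              dsimp only at ha hm
              dsimp only
              have hv : min (get2 matrix 0 (j : Int)) a = g matrix 0 j := by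
                rw [g_row0 matrix j hj2, ha]
              exact ⟨hv, GoodMemo_insert matrix m1 0 j _ hm hv⟩
            · rw [if_neg hi0]
              by_cases hj0 : j = 0
              · rw [if_pos hj0]
                subst hj0
                have hi2 : 2 ≤ i := by omega
                obtain ⟨ha, hm⟩ := ih (i - 1) 0 (by omega) memo hg
                rcases hr : goB matrix memo (i - 1) 0 with ⟨m1, a⟩
                rw [hr] at ha hm
                dsimp only at ha hm
                dsimp only
                have hv : min (get2 matrix (i : Int) 0) a = g matrix i 0 := by
                  rw [g_col0 matrix i hi2, ha]
                exact ⟨hv, GoodMemo_insert matrix m1 i 0 _ hm hv⟩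
              · rw [if_neg hj0]
                obtain ⟨ha, hm1⟩ := ih (i - 1) j (by omega) memo hg
                rcases hr1 : goB matrix memo (i - 1) j with ⟨m1, a⟩
                rw [hr1] at ha hm1
                dsimp only at ha hm1
                obtain ⟨hb, hm2⟩ := ih i (j - 1) (by omega) m1 hm1
                rcases hr2 : goB matrix m1 i (j - 1) with ⟨m2, b⟩
                rw [hr2] at hb hm2
                dsimp only at hb hm2
                dsimp only
                have hv : min (get2 matrix (i : Int) (j : Int)) (max a b) = g matrix i j := by
                  rw [g_main matrix i j (by omega) (by omega), ha, hb]
                exact ⟨hv, GoodMemo_insert matrix m2 i j _ hm2 hv⟩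

def cell (dp : List (List Int)) (a b : Nat) : Int :=
  ((dp[a]?.getD [])[b]?).getD 0

def setc (dp : List (List Int)) (a b : Nat) (v : Int) : List (List Int) :=
  dp.set a ((dp.getD a []).set b v)

theorem get2_cast (dp : List (List Int)) (a b : Nat) :
    get2 dp (a : Int) (b : Int) = cell dp a b := by
  simp [get2, cell]

theorem set2_cast (dp : List (List Int)) (a b : Nat) (v : Int) :
    set2 dp (a : Int) (b : Int) v = setc dp a b v := by
  simp [set2, setc]

def Shape (matrix dp : List (List Int)) : Prop :=
  dp.length = matrix.length ∧ ∀ row ∈ dp, row.length = (matrix.headD []).length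

theorem row_len (matrix dp : List (List Int)) (a : Nat) (h : Shape matrix dp)
    (ha : a < dp.length) : (dp.getD a []).length = (matrix.headD []).length := by
  have : dp.getD a [] = dp[a] := by
    simp [List.getD_eq_getElem?_getD, List.getElem?_eq_getElem ha]
  rw [this]
  exact h.2 _ (List.getElem_mem ha)

theorem shape_setc (matrix dp : List (List Int)) (a b : Nat) (v : Int)
    (h : Shape matrix dp) (ha : a < dp.length) : Shape matrix (setc dp a b v) := by
  refine ⟨by simp [setc, h.1], ?_⟩
  intro row hrow
  rcases List.mem_or_eq_of_mem_set hrow with hmem | heq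
  · exact h.2 _ hmem
  · rw [heq, List.length_set]
    exact row_len matrix dp a h ha

theorem cell_setc_self (matrix dp : List (List Int)) (a b : Nat) (v : Int)
    (h : Shape matrix dp) (ha : a < dp.length)
    (hb : b < (matrix.headD []).length) : cell (setc dp a b v) a b = v := by
  have hrl : (dp.getD a []).length = (matrix.headD []).length := row_len matrix dp a h ha
  have hba : b < dp[a].length := by
    rwa [show dp[a] = dp.getD a [] from by
      simp [List.getD_eq_getElem?_getD, List.getElem?_eq_getElem ha], hrl]
  simp [cell, setc, List.getElem?_set, ha, List.getD_eq_getElem?_getD, hba]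

theorem cell_setc_ne (dp : List (List Int)) (a b a' b' : Nat) (v : Int)
    (hne : a ≠ a' ∨ b ≠ b') : cell (setc dp a b v) a' b' = cell dp a' b' := by
  rcases hne with hne | hne
  · simp [cell, setc, hne]
  · by_cases haa : a = a'
    · subst haa
      by_cases ha : a < dp.length
      · simp [cell, setc, List.getElem?_set, ha, hne, List.getD_eq_getElem?_getD,
          List.getElem?_eq_getElem ha]
      · simp [cell, setc, ha]
    · simp [cell, setc, haa]

theorem get2_zero_cast (dp : List (List Int)) (b : Nat) :
    get2 dp 0 (b : Int) = cell dp 0 b := get2_cast dp 0 b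

theorem get2_cast_zero (dp : List (List Int)) (a : Nat) :
    get2 dp (a : Int) 0 = cell dp a 0 := get2_cast dp a 0

theorem set2_zero_cast (dp : List (List Int)) (b : Nat) (v : Int) :
    set2 dp 0 (b : Int) v = setc dp 0 b v := set2_cast dp 0 b v

theorem set2_cast_zero (dp : List (List Int)) (a : Nat) (v : Int) :
    set2 dp (a : Int) 0 v = setc dp a 0 v := set2_cast dp a 0 v

theorem loop1_inv (matrix : List (List Int)) :
    ∀ (k : Nat) (jI : Int) (j : Nat), jI = (j : Int) → j + k = (matrix.headD []).length → 2 ≤ j →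
    ∀ dp, Shape matrix dp → (∀ b, b < j → cell dp 0 b = g matrix 0 b) →
    ∀ r, r = (PySem.List.pyRange jI ((matrix.headD []).length : Int) 1).foldl
        (fun dp i => set2 dp 0 i (min (get2 matrix 0 i) (get2 dp 0 (i - 1)))) dp →
      Shape matrix r ∧ (∀ b, b < (matrix.headD []).length → cell r 0 b = g matrix 0 b) ∧
      (∀ a b, 1 ≤ a → cell r a b = cell dp a b) := by
  intro k
  induction k with
  | zero =>
    intro jI j hjI hjk h2 dp hsh hcells r hr
    have hj : j = (matrix.headD []).length := by omega
    rw [hjI, PySem.List.pyRange_one_eq_nil (by exact_mod_cast hj.ge)] at hr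
    subst hr
    exact ⟨hsh, fun b hb => hcells b (by omega), fun a b _ => rfl⟩
  | succ k ih =>
    intro jI j hjI hjk h2 dp hsh hcells r hr
    have hjM : j < (matrix.headD []).length := by omega
    have hmat : 0 < matrix.length := by
      rcases matrix with _ | ⟨row, rest⟩
      · simp at hjM
      · simp
    rw [hjI, PySem.List.pyRange_one_cons (by exact_mod_cast hjM), List.foldl_cons] at hr
    rw [show ((j : Int) - 1) = ((j - 1 : Nat) : Int) by omega,
      get2_zero_cast, get2_zero_cast, set2_zero_cast,
      show ((j : Int) + 1) = ((j + 1 : Nat) : Int) by omega] at hr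
    have hlen : 0 < dp.length := by rw [hsh.1]; omega
    have hv : min (cell matrix 0 j) (cell dp 0 (j - 1)) = g matrix 0 j := by
      rw [hcells (j - 1) (by omega), g_row0 matrix j h2, get2_zero_cast]
    obtain ⟨hsh', hrow', hpres'⟩ := ih ((j + 1 : Nat) : Int) (j + 1) rfl (by omega) (by omega)
      (setc dp 0 j (min (cell matrix 0 j) (cell dp 0 (j - 1))))
      (shape_setc matrix dp 0 j _ hsh hlen)
      (by
        intro b hb
        by_cases hbj : b = j
        · subst hbj
          rw [cell_setc_self matrix dp 0 b _ hsh hlen hjM]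
          exact hv
        · rw [cell_setc_ne dp 0 j 0 b _ (Or.inr (fun h => hbj h.symm))]
          exact hcells b (by omega))
      r hr
    refine ⟨hsh', hrow', ?_⟩
    intro a b ha
    rw [hpres' a b ha, cell_setc_ne dp 0 j a b _ (Or.inl (by omega))]

theorem loop2_inv (matrix : List (List Int)) (hM : 1 ≤ (matrix.headD []).length) :
    ∀ (k : Nat) (iI : Int) (i : Nat), iI = (i : Int) → i + k = matrix.length → 2 ≤ i →
    ∀ dp, Shape matrix dp → (∀ a, a < i → cell dp a 0 = g matrix a 0) →
    ∀ r, r = (PySem.List.pyRange iI (matrix.length : Int) 1).foldl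
        (fun dp i => set2 dp i 0 (min (get2 matrix i 0) (get2 dp (i - 1) 0))) dp →
      Shape matrix r ∧ (∀ a, a < matrix.length → cell r a 0 = g matrix a 0) ∧
      (∀ a b, a = 0 ∨ 1 ≤ b → cell r a b = cell dp a b) := by
  intro k
  induction k with
  | zero =>
    intro iI i hiI hik h2 dp hsh hcells r hr
    have hi : i = matrix.length := by omega
    rw [hiI, PySem.List.pyRange_one_eq_nil (by exact_mod_cast hi.ge)] at hr
    subst hr
    exact ⟨hsh, fun a ha => hcells a (by omega), fun a b _ => rfl⟩
  | succ k ih =>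
    intro iI i hiI hik h2 dp hsh hcells r hr
    have hiN : i < matrix.length := by omega
    rw [hiI, PySem.List.pyRange_one_cons (by exact_mod_cast hiN), List.foldl_cons] at hr
    rw [show ((i : Int) - 1) = ((i - 1 : Nat) : Int) by omega,
      get2_cast_zero, get2_cast_zero, set2_cast_zero,
      show ((i : Int) + 1) = ((i + 1 : Nat) : Int) by omega] at hr
    have hlen : i < dp.length := by rw [hsh.1]; omega
    have hv : min (cell matrix i 0) (cell dp (i - 1) 0) = g matrix i 0 := by
      rw [hcells (i - 1) (by omega), g_col0 matrix i h2, get2_cast_zero]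
    obtain ⟨hsh', hcol', hpres'⟩ := ih ((i + 1 : Nat) : Int) (i + 1) rfl (by omega) (by omega)
      (setc dp i 0 (min (cell matrix i 0) (cell dp (i - 1) 0)))
      (shape_setc matrix dp i 0 _ hsh hlen)
      (by
        intro a ha
        by_cases hai : a = i
        · subst hai
          rw [cell_setc_self matrix dp a 0 _ hsh hlen hM]
          exact hv
        · rw [cell_setc_ne dp i 0 a 0 _ (Or.inl (fun h => hai h.symm))]
          exact hcells a (by omega))
      r hr
    refine ⟨hsh', hcol', ?_⟩
    intro a b hab
    rw [hpres' a b hab]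
    rcases hab with hab | hab
    · exact cell_setc_ne dp i 0 a b _ (Or.inl (by omega))
    · exact cell_setc_ne dp i 0 a b _ (Or.inr (by omega))

def RowsOK (matrix dp : List (List Int)) (i j : Nat) : Prop :=
  ∀ a b, a < matrix.length → b < (matrix.headD []).length →
    (a = 0 ∨ b = 0 ∨ a < i ∨ (a = i ∧ b < j)) → cell dp a b = g matrix a b

theorem loop3_inner (matrix : List (List Int)) (i : Nat) (hi1 : 1 ≤ i)
    (hiN : i < matrix.length) :
    ∀ (k : Nat) (jI : Int) (j : Nat), jI = (j : Int) → j + k = (matrix.headD []).length →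
    1 ≤ j →
    ∀ dp, Shape matrix dp → RowsOK matrix dp i j →
    ∀ r, r = (PySem.List.pyRange jI ((matrix.headD []).length : Int) 1).foldl
        (fun dp jj => set2 dp (i : Int) jj (min (get2 matrix (i : Int) jj)
          (max (get2 dp ((i : Int) - 1) jj) (get2 dp (i : Int) (jj - 1))))) dp →
      Shape matrix r ∧ RowsOK matrix r i (matrix.headD []).length := by
  intro k
  induction k with
  | zero =>
    intro jI j hjI hjk h1 dp hsh hrows r hr
    have hj : j = (matrix.headD []).length := by omega
    rw [hjI, PySem.List.pyRange_one_eq_nil (by exact_mod_cast hj.ge)] at hr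
    subst hr hj
    exact ⟨hsh, hrows⟩
  | succ k ih =>
    intro jI j hjI hjk h1 dp hsh hrows r hr
    have hjM : j < (matrix.headD []).length := by omega
    rw [hjI, PySem.List.pyRange_one_cons (by exact_mod_cast hjM), List.foldl_cons] at hr
    have hlen : i < dp.length := by rw [hsh.1]; omega
    have hv : min (cell matrix i j) (max (cell dp (i - 1) j) (cell dp i (j - 1)))
        = g matrix i j := by
      rw [hrows (i - 1) j (by omega) hjM (by omega),
        hrows i (j - 1) (by omega) (by omega) (by right; right; right; exact ⟨rfl, by omega⟩),
        g_main matrix i j hi1 h1, get2_cast]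
    have hstep : set2 dp (i : Int) (j : Int) (min (get2 matrix (i : Int) (j : Int))
        (max (get2 dp ((i : Int) - 1) (j : Int)) (get2 dp (i : Int) ((j : Int) - 1))))
        = setc dp i j (min (cell matrix i j) (max (cell dp (i - 1) j) (cell dp i (j - 1)))) := by
      rw [show ((j : Int) - 1) = ((j - 1 : Nat) : Int) by omega,
        show ((i : Int) - 1) = ((i - 1 : Nat) : Int) by omega,
        get2_cast, get2_cast, get2_cast, set2_cast]
    rw [hstep, show ((j : Int) + 1) = ((j + 1 : Nat) : Int) by omega] at hr
    obtain ⟨hsh', hrows'⟩ := ih ((j + 1 : Nat) : Int) (j + 1) rfl (by omega) (by omega)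
      (setc dp i j _)
      (shape_setc matrix dp i j _ hsh hlen)
      (by
        intro a b ha hb hcond
        by_cases hab : a = i ∧ b = j
        · obtain ⟨rfl, rfl⟩ := hab
          rw [cell_setc_self matrix dp a b _ hsh hlen hjM]
          exact hv
        · rw [cell_setc_ne dp i j a b _ (by omega)]
          exact hrows a b ha hb (by omega))
      r hr
    exact ⟨hsh', hrows'⟩

theorem loop3_outer (matrix : List (List Int)) (hM : 2 ≤ (matrix.headD []).length) :
    ∀ (k : Nat) (iI : Int) (i : Nat), iI = (i : Int) → i + k = matrix.length → 1 ≤ i →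
    ∀ dp, Shape matrix dp → RowsOK matrix dp i 1 →
    ∀ r, r = (PySem.List.pyRange iI (matrix.length : Int) 1).foldl
        (fun dp ii => (PySem.List.pyRange 1 ((matrix.headD []).length : Int) 1).foldl
          (fun dp jj => set2 dp ii jj (min (get2 matrix ii jj)
            (max (get2 dp (ii - 1) jj) (get2 dp ii (jj - 1))))) dp) dp →
      Shape matrix r ∧ RowsOK matrix r matrix.length 1 := by
  intro k
  induction k with
  | zero =>
    intro iI i hiI hik h1 dp hsh hrows r hr
    have hi : i = matrix.length := by omega
    rw [hiI, show PySem.List.pyRange (i : Int) (matrix.length : Int) 1 = []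
      from PySem.List.pyRange_one_eq_nil (by exact_mod_cast hi.ge)] at hr
    subst hr hi
    exact ⟨hsh, hrows⟩
  | succ k ih =>
    intro iI i hiI hik h1 dp hsh hrows r hr
    have hiN : i < matrix.length := by omega
    rw [hiI, show PySem.List.pyRange (i : Int) (matrix.length : Int) 1
        = (i : Int) :: PySem.List.pyRange ((i : Int) + 1) (matrix.length : Int) 1
      from PySem.List.pyRange_one_cons (by exact_mod_cast hiN), List.foldl_cons] at hr
    rw [show ((i : Int) + 1) = ((i + 1 : Nat) : Int) by omega] at hr
    obtain ⟨hsh', hrows'⟩ := loop3_inner matrix i h1 hiN ((matrix.headD []).length - 1)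
      (1 : Int) 1 (by norm_cast) (by omega) (le_refl 1) dp hsh hrows _ rfl
    obtain ⟨hsh'', hrows''⟩ := ih ((i + 1 : Nat) : Int) (i + 1) rfl (by omega) (by omega)
      _ hsh'
      (by
        intro a b ha hb hcond
        exact hrows' a b ha hb (by omega))
      r hr
    exact ⟨hsh'', hrows''⟩

theorem get2_neg_cell (matrix dp : List (List Int)) (hsh : Shape matrix dp)
    (kN kM : Nat) (hkN : 0 < kN) (hkN2 : kN ≤ matrix.length)
    (hkM : 0 < kM) (hkM2 : kM ≤ (matrix.headD []).length) :
    get2 dp (-(kN : Int)) (-(kM : Int))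
      = cell dp (matrix.length - kN) ((matrix.headD []).length - kM) := by
  unfold get2 cell
  rw [PySem.List.pyGet?_neg_natCast dp kN hkN (by rw [hsh.1]; omega)]
  have hidx : dp.length - kN < dp.length := by rw [hsh.1]; omega
  rw [List.getElem?_eq_getElem hidx]
  have hrow : dp[dp.length - kN].length = (matrix.headD []).length :=
    hsh.2 _ (List.getElem_mem hidx)
  simp only [Option.getD_some]
  rw [PySem.List.pyGet?_neg_natCast _ kM hkM (by omega), hrow]
  rw [show matrix.length - kN = dp.length - kN from by rw [hsh.1]]
  rw [List.getElem?_eq_getElem hidx]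
  simp

def stage2 (matrix : List (List Int)) : List (List Int) :=
  set2 (set2 (List.replicate matrix.length (List.replicate (matrix.headD []).length (0 : Int)))
    0 1 (get2 matrix 0 1)) 1 0 (get2 matrix 1 0)

def stage3 (matrix : List (List Int)) : List (List Int) :=
  (PySem.List.pyRange 2 ((matrix.headD []).length : Int) 1).foldl
    (fun dp i => set2 dp 0 i (min (get2 matrix 0 i) (get2 dp 0 (i - 1)))) (stage2 matrix)

def stage4 (matrix : List (List Int)) : List (List Int) :=
  (PySem.List.pyRange 2 (matrix.length : Int) 1).foldl
    (fun dp i => set2 dp i 0 (min (get2 matrix i 0) (get2 dp (i - 1) 0))) (stage3 matrix)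

def stage5 (matrix : List (List Int)) : List (List Int) :=
  (PySem.List.pyRange 1 (matrix.length : Int) 1).foldl
    (fun dp i => (PySem.List.pyRange 1 ((matrix.headD []).length : Int) 1).foldl
      (fun dp j => set2 dp i j (min (get2 matrix i j) (max (get2 dp (i - 1) j) (get2 dp i (j - 1))))) dp)
    (stage4 matrix)

theorem main_eq (matrix : List (List Int)) (hN : 2 ≤ matrix.length)
    (hM : 2 ≤ (matrix.headD []).length) :
    max_min_path matrix = max_min_path_alt matrix := by
  have hc1 : ¬ (matrix.length = 0 ∨ (matrix.headD []).length = 0) := by omega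
  have hmul : 2 * 2 ≤ matrix.length * (matrix.headD []).length := Nat.mul_le_mul hN hM
  have hc2 : ¬ ((matrix.length : Int) * ((matrix.headD []).length : Int) ≤ 2) := by
    exact_mod_cast fun h => absurd (by exact_mod_cast h : matrix.length * (matrix.headD []).length ≤ 2) (by omega)
  have hc2n : ¬ (matrix.length * (matrix.headD []).length ≤ 2) := by omega
  have hc3 : ¬ ((matrix.length : Int) = 1) := by
    intro h
    have : matrix.length = 1 := by exact_mod_cast h
    omega
  have hc4 : ¬ (((matrix.headD []).length : Int) = 1) := by
    intro h
    have : (matrix.headD []).length = 1 := by exact_mod_cast h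
    omega
  have hc3n : ¬ (matrix.length = 1) := by omega
  have hc4n : ¬ ((matrix.headD []).length = 1) := by omega
  -- shapes and seeds
  have hsh0 : Shape matrix (List.replicate matrix.length (List.replicate (matrix.headD []).length (0 : Int))) := by
    refine ⟨by simp, ?_⟩
    intro row hrow
    rw [List.eq_of_mem_replicate hrow]
    simp
  have hcell0 : ∀ a b : Nat, cell (List.replicate matrix.length (List.replicate (matrix.headD []).length (0 : Int))) a b = 0 := by
    intro a b
    simp only [cell, List.getElem?_replicate]
    split_ifs <;> simp [List.getElem?_replicate] <;> split_ifs <;> simp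
  have hlen0 : (List.replicate matrix.length (List.replicate (matrix.headD []).length (0 : Int))).length = matrix.length := by simp
  have hs2 : stage2 matrix = setc (setc (List.replicate matrix.length (List.replicate (matrix.headD []).length (0 : Int)))
      0 1 (get2 matrix 0 1)) 1 0 (get2 matrix 1 0) := rfl
  have hsh1 : Shape matrix (setc (List.replicate matrix.length (List.replicate (matrix.headD []).length (0 : Int))) 0 1 (get2 matrix 0 1)) :=
    shape_setc matrix _ 0 1 _ hsh0 (by omega)
  have hlen1 : (setc (List.replicate matrix.length (List.replicate (matrix.headD []).length (0 : Int))) 0 1 (get2 matrix 0 1)).length = matrix.length := by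
    simp [setc]
  have hsh2 : Shape matrix (stage2 matrix) := by
    rw [hs2]
    exact shape_setc matrix _ 1 0 _ hsh1 (by omega)
  have hcells2 : ∀ b, b < 2 → cell (stage2 matrix) 0 b = g matrix 0 b := by
    intro b hb
    rw [hs2, cell_setc_ne _ 1 0 0 b _ (Or.inl (by omega))]
    interval_cases b
    · rw [cell_setc_ne _ 0 1 0 0 _ (Or.inr (by omega)), hcell0, g]
    · rw [cell_setc_self matrix _ 0 1 _ hsh0 (by omega) (by omega), g]
  have hcol2 : cell (stage2 matrix) 1 0 = g matrix 1 0 := by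
    rw [hs2, cell_setc_self matrix _ 1 0 _ hsh1 (by omega) (by omega), g]
  -- loop 1
  obtain ⟨hsh3, hrow3, hpres3⟩ := loop1_inv matrix ((matrix.headD []).length - 2) 2 2
    (by norm_cast) (by omega) (by omega) (stage2 matrix) hsh2 hcells2 (stage3 matrix) (by rw [stage3])
  -- loop 2
  obtain ⟨hsh4, hcol4, hpres4⟩ := loop2_inv matrix (by omega) (matrix.length - 2) 2 2
    (by norm_cast) (by omega) (by omega) (stage3 matrix) hsh3
    (by
      intro a ha
      interval_cases a
      · exact hrow3 0 (by omega)
      · rw [hpres3 1 0 (by omega)]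
        exact hcol2)
    (stage4 matrix) (by rw [stage4])
  -- loop 3
  obtain ⟨hsh5, hrows5⟩ := loop3_outer matrix hM (matrix.length - 1) 1 1
    (by norm_cast) (by omega) (by omega) (stage4 matrix) hsh4
    (by
      intro a b ha hb hcond
      have hab : a = 0 ∨ b = 0 := by omega
      rcases hab with rfl | rfl
      · rw [hpres4 0 b (Or.inl rfl)]
        exact hrow3 b hb
      · exact hcol4 a ha)
    (stage5 matrix) (by rw [stage5])
  have hcell5 : ∀ a b : Nat, a < matrix.length → b < (matrix.headD []).length →
      cell (stage5 matrix) a b = g matrix a b := by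
    intro a b ha hb
    exact hrows5 a b ha hb (by omega)
  -- A side
  rw [max_min_path]
  simp only [if_neg hc1, if_neg hc2, if_neg hc3, if_neg hc4]
  show max (get2 (stage5 matrix) (-2) (-1)) (get2 (stage5 matrix) (-1) (-2)) = max_min_path_alt matrix
  rw [show (-2 : Int) = -((2 : Nat) : Int) by norm_cast, show (-1 : Int) = -((1 : Nat) : Int) by norm_cast]
  rw [get2_neg_cell matrix _ hsh5 2 1 (by omega) (by omega) (by omega) (by omega),
    get2_neg_cell matrix _ hsh5 1 2 (by omega) (by omega) (by omega) (by omega)]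
  rw [hcell5 (matrix.length - 2) ((matrix.headD []).length - 1) (by omega) (by omega),
    hcell5 (matrix.length - 1) ((matrix.headD []).length - 2) (by omega) (by omega)]
  -- B side
  rw [max_min_path_alt]
  simp only [if_neg hc1, if_neg hc2n, if_neg hc3n, if_neg hc4n]
  obtain ⟨ha1, hm1⟩ := goB_spec matrix ((matrix.length - 2) + ((matrix.headD []).length - 1))
    (matrix.length - 2) ((matrix.headD []).length - 1) le_rfl PySem.Dict.empty (GoodMemo_empty matrix)
  rcases hg1 : goB matrix PySem.Dict.empty (matrix.length - 2) ((matrix.headD []).length - 1) with ⟨memo1, a⟩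
  rw [hg1] at ha1 hm1
  dsimp only at ha1 hm1
  obtain ⟨hb1, _⟩ := goB_spec matrix ((matrix.length - 1) + ((matrix.headD []).length - 2))
    (matrix.length - 1) ((matrix.headD []).length - 2) le_rfl memo1 hm1
  rcases hg2 : goB matrix memo1 (matrix.length - 1) ((matrix.headD []).length - 2) with ⟨memo2, b⟩
  rw [hg2] at hb1
  dsimp only at hb1
  rw [ha1, hb1]

-- ===== VERDICT (by name: the statement is the Claim_ definition above) =====
theorem max_min_path_spec : Claim_equal_max_min_path := by
  unfold Claim_equal_max_min_path Spec_max_min_path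
  intro matrix _ hpre
  by_cases h1 : matrix.length = 0 ∨ (matrix.headD []).length = 0
  · rw [max_min_path, max_min_path_alt, if_pos h1, if_pos h1]
  · by_cases h2 : matrix.length * (matrix.headD []).length ≤ 2
    · have h2i : (matrix.length : Int) * ((matrix.headD []).length : Int) ≤ 2 := by exact_mod_cast h2
      simp only [max_min_path, max_min_path_alt, if_neg h1, if_pos h2i, if_pos h2]
    · rcases hpre with h | h | h | ⟨hN, hM, _⟩
      · exact absurd (Or.inl h) h1
      · exact absurd (Or.inr h) h1
      · exact absurd h h2
      · exact main_eq matrix hN hM
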